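-- pv_equiv track=rewrite | github.com/pyember/ember-v2 | tests/examples/test_base.py | parse_output_sections
-- ===== SOURCE A (Python) =====
-- from typing import Dict, List, Optional, Tuple, Any
--
-- def parse_output_sections(output: str) -> List[Dict[str, str]]:
--     """Parse output into sections based on headers.
--
--     Args:
--         output: Raw stdout from example
--
--     Returns:
--         List of sections with headers and content
--     """
--     sections = []
--     current_section = None
--     current_content = []
--
--     for line in output.splitlines():
--         # Detect section headers (lines starting with "=" or "-" decorations)
--         if line.strip() and (line.startswith("===") or line.startswith("---")):
--             # Save previous section
--             if current_section:
--                 sections.append(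
--                     {
--                         "header": current_section,
--                         "output": "\n".join(current_content).strip(),
--                     }
--                 )
--             # Start new section
--             current_section = None
--             current_content = []
--         elif line.strip() and current_section is None and not line.startswith(" "):
--             # This might be a section header
--             current_section = line.strip()
--         else:
--             current_content.append(line)
--
--     # Save last section
--     if current_section or current_content:
--         sections.append(
--             {
--                 "header": current_section or "Output",
--                 "output": "\n".join(current_content).strip(),
--             }
--         )
--
--     return sections
-- ===== SOURCE B (Python) =====
-- def _split_block(block):
--     """Split one decoration-delimited block into (header, content lines)."""
--     header = None
--     content = []
--     for line in block:
--         if header is None and line.strip() and not line.startswith(" "):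
--             header = line.strip()
--         else:
--             content.append(line)
--     return header, content
--
--
-- def parse_output_sections(output):
--     # Phase 1: cut the lines into blocks at decoration lines ("===" / "---").
--     done = []
--     cur = []
--     for line in output.splitlines():
--         if line.strip() and (line.startswith("===") or line.startswith("---")):
--             done.append(cur)
--             cur = []
--         else:
--             cur.append(line)
--     # Phase 2: emit sections. A non-final block is kept only if it has a header;
--     # the final block is kept if it has a header or any content lines.
--     sections = []
--     for block in done:
--         header, content = _split_block(block)
--         if header is not None:
--             sections.append({"header": header, "output": "\n".join(content).strip()})
--     header, content = _split_block(cur)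
--     if header is not None or content:
--         sections.append({"header": header or "Output", "output": "\n".join(content).strip()})
--     return sections
-- ===== Notes on version B (the rewrite author's own statement) =====
-- stated objective: alternative
-- what changed: Replaces A's single stateful loop (current header/content with in-loop flushing) by a two-phase decomposition: first cut the lines into decoration-delimited blocks, then split each block into header/content and emit, with the last block handled by its own rule.
import Mathlib
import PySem

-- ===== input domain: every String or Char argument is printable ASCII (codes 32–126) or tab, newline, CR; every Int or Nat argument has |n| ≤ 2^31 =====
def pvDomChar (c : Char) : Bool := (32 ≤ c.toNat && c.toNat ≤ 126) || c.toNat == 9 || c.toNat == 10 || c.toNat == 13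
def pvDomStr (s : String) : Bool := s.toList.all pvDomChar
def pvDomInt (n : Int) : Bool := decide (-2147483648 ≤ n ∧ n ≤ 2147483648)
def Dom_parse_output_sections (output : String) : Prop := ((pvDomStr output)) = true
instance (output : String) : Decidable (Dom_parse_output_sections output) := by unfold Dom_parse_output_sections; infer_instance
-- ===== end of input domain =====

-- B replaces A's single stateful loop by a two-phase decomposition (cut into blocks, then emit each block); alternative structure, same cost.

-- shared line predicates (the same source expressions appear verbatim in both Pythons)
def pvDeco (line : String) : Bool :=
  (PySem.Str.strip line != "") && (PySem.Str.startswith line "===" || PySem.Str.startswith line "---")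

def pvHead (line : String) : Bool :=
  (PySem.Str.strip line != "") && !(PySem.Str.startswith line " ")

def pvSec (h : String) (c : List String) : List (String × String) :=
  [("header", h), ("output", PySem.Str.strip (PySem.Str.join "\n" c))]

-- ===== PORT A =====
-- state = (sections, current_section, current_content); Python truthiness of current_section kept exactly ("" is falsy)
def pvAStep (st : List (List (String × String)) × Option String × List String) (line : String) :
    List (List (String × String)) × Option String × List String :=
  if pvDeco line then
    ((match st.2.1 with
      | some h => if h == "" then st.1 else st.1 ++ [pvSec h st.2.2]
      | none => st.1), none, [])
  else if st.2.1.isNone && pvHead line then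
    (st.1, some (PySem.Str.strip line), st.2.2)
  else
    (st.1, st.2.1, st.2.2 ++ [line])

-- the "save last section" tail of A
def pvAFin (st : List (List (String × String)) × Option String × List String) :
    List (List (String × String)) :=
  if (match st.2.1 with | some h => h != "" | none => false) || st.2.2 != [] then
    st.1 ++ [pvSec (match st.2.1 with | some h => if h == "" then "Output" else h | none => "Output") st.2.2]
  else st.1

def parse_output_sections (output : String) : List (List (String × String)) :=
  pvAFin ((PySem.Str.splitlines output).foldl pvAStep ([], none, []))

-- ===== PORT B =====
-- phase 1: cut lines into blocks at decoration lines; state = (done, cur)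
def pvBlockStep (st : List (List String) × List String) (line : String) :
    List (List String) × List String :=
  if pvDeco line then (st.1 ++ [st.2], []) else (st.1, st.2 ++ [line])

-- _split_block: one block -> (header, content lines)
def pvSplitStep (st : Option String × List String) (line : String) : Option String × List String :=
  if st.1.isNone && pvHead line then (some (PySem.Str.strip line), st.2) else (st.1, st.2 ++ [line])

def pvSplitBlock (block : List String) : Option String × List String :=
  block.foldl pvSplitStep (none, [])

-- phase 2, non-final blocks: emit only if a header was found
def pvMidStep (acc : List (List (String × String))) (block : List String) :
    List (List (String × String)) :=
  match pvSplitBlock block with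
  | (some h, content) => acc ++ [pvSec h content]
  | (none, _) => acc

-- phase 2, final block: emit if header found or content nonempty ('header or "Output"' kept exactly)
def pvBFin (dc : List (List String) × List String) : List (List (String × String)) :=
  let sections := dc.1.foldl pvMidStep []
  match pvSplitBlock dc.2 with
  | (header, content) =>
    if header.isSome || content != [] then
      sections ++ [pvSec (match header with | some h => if h == "" then "Output" else h | none => "Output") content]
    else sections

def parse_output_sections_alt (output : String) : List (List (String × String)) :=
  pvBFin ((PySem.Str.splitlines output).foldl pvBlockStep ([], []))

-- ===== PRECONDITION & SPEC =====
def Spec_parse_output_sections (output : String) (out : List (List (String × String))) : Prop := out = parse_output_sections_alt output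
instance (output : String) (out : List (List (String × String))) : Decidable (Spec_parse_output_sections output out) := by unfold Spec_parse_output_sections; infer_instance

-- ===== CLAIM (what is proved, stated in full; the proofs are below) =====
def Claim_equal_parse_output_sections : Prop := ∀ (output : String), Dom_parse_output_sections output → Spec_parse_output_sections output (parse_output_sections output)

-- ===== LEMMAS AND PROOFS =====

lemma pvHead_strip_ne {l : String} (h : pvHead l = true) : PySem.Str.strip l ≠ "" := by
  unfold pvHead at h
  simp only [Bool.and_eq_true, bne_iff_ne, ne_eq] at h
  exact h.1

lemma pvSplitStep_ok (st : Option String × List String) (l : String)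
    (h : ∀ x, st.1 = some x → x ≠ "") :
    ∀ x, (pvSplitStep st l).1 = some x → x ≠ "" := by
  unfold pvSplitStep
  split_ifs with hc
  · intro x hx
    simp only [Option.some.injEq] at hx
    subst hx
    exact pvHead_strip_ne (Bool.and_elim_right hc)
  · exact h

lemma pvSplitBlock_fold_ok (b : List String) :
    ∀ st : Option String × List String, (∀ x, st.1 = some x → x ≠ "") →
      ∀ x, (b.foldl pvSplitStep st).1 = some x → x ≠ "" := by
  induction b with
  | nil => intro st h; simpa using h
  | cons l ls ih =>
      intro st h
      simpa using ih (pvSplitStep st l) (pvSplitStep_ok st l h)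

lemma pvSplitBlock_ok (b : List String) : ∀ x, (pvSplitBlock b).1 = some x → x ≠ "" :=
  pvSplitBlock_fold_ok b (none, []) (by simp)

lemma pvAStep_nondeco (s : List (List (String × String))) (hc : Option String × List String)
    (l : String) (hd : pvDeco l = false) :
    pvAStep (s, hc) l = (s, pvSplitStep hc l) := by
  simp only [pvAStep, pvSplitStep, hd, Bool.false_eq_true, if_false]
  split_ifs <;> rfl

lemma pvSplitBlock_concat (b : List String) (l : String) :
    pvSplitBlock (b ++ [l]) = pvSplitStep (pvSplitBlock b) l := by
  simp [pvSplitBlock, List.foldl_append]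

lemma pvSplitBlock_nil : pvSplitBlock [] = (none, []) := rfl

lemma pvMaster (lines : List String) :
    ∀ (done : List (List String)) (cur : List String),
      pvAFin (lines.foldl pvAStep (done.foldl pvMidStep [], pvSplitBlock cur)) =
      pvBFin (lines.foldl pvBlockStep (done, cur)) := by
  induction lines with
  | nil =>
      intro done cur
      simp only [List.foldl_nil, pvAFin, pvBFin]
      rcases hsb : pvSplitBlock cur with ⟨h, c⟩
      cases h with
      | none => simp
      | some x =>
          have hx : x ≠ "" := pvSplitBlock_ok cur x (by rw [hsb])
          simp [hx, bne_iff_ne]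
  | cons l ls ih =>
      intro done cur
      by_cases hd : pvDeco l = true
      · simp only [List.foldl_cons]
        have h1 : pvAStep (done.foldl pvMidStep [], pvSplitBlock cur) l =
            ((done ++ [cur]).foldl pvMidStep [], pvSplitBlock []) := by
          rcases hsb : pvSplitBlock cur with ⟨h, c⟩
          cases h with
          | none => simp [pvAStep, hd, pvMidStep, hsb, pvSplitBlock_nil, List.foldl_append]
          | some x =>
              have hx : x ≠ "" := pvSplitBlock_ok cur x (by rw [hsb])
              simp [pvAStep, hd, pvMidStep, hsb, pvSplitBlock_nil, List.foldl_append, hx]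
        have h2 : pvBlockStep (done, cur) l = (done ++ [cur], []) := by
          simp [pvBlockStep, hd]
        rw [h1, h2]
        exact ih (done ++ [cur]) []
      · have hd' : pvDeco l = false := by simpa using hd
        simp only [List.foldl_cons]
        have h1 : pvAStep (done.foldl pvMidStep [], pvSplitBlock cur) l =
            (done.foldl pvMidStep [], pvSplitBlock (cur ++ [l])) := by
          rw [pvSplitBlock_concat]
          exact pvAStep_nondeco _ _ _ hd'
        have h2 : pvBlockStep (done, cur) l = (done, cur ++ [l]) := by
          simp [pvBlockStep, hd']
        rw [h1, h2]
        exact ih done (cur ++ [l])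

-- ===== VERDICT (by name: the statement is the Claim_ definition above) =====
theorem parse_output_sections_spec : Claim_equal_parse_output_sections := by
  intro output _
  unfold Spec_parse_output_sections parse_output_sections parse_output_sections_alt
  have := pvMaster (PySem.Str.splitlines output) [] []
  simpa [pvSplitBlock] using this
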